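-- pv_equiv track=rewrite | github.com/ashishsuperatom/tech-docs | fix_cardgrid.py | fix_cardgrid_tags
-- ===== SOURCE A (Python) =====
-- def fix_cardgrid_tags(content: str) -> str:
--     """Add missing </CardGrid> tags after Card elements."""
--
--     lines = content.split('\n')
--     result = []
--     open_cardgrids = 0
--     i = 0
--
--     while i < len(lines):
--         line = lines[i]
--
--         # Count CardGrid opens
--         opens_in_line = line.count('<CardGrid>')
--         closes_in_line = line.count('</CardGrid>')
--
--         open_cardgrids += opens_in_line - closes_in_line
--
--         result.append(line)
--
--         # If we have open CardGrids, look for the end of card content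
--         if open_cardgrids > 0:
--             # Check if this is a Card closing or the last Card in a group
--             if '</Card>' in line or '/>' in line:
--                 # Look ahead to see if next non-empty line is not a Card
--                 j = i + 1
--                 while j < len(lines) and lines[j].strip() == '':
--                     j += 1
--
--                 if j < len(lines):
--                     next_line = lines[j].strip()
--                     # If next line is a new section (##) or empty/other content, close CardGrid
--                     if (next_line.startswith('##') or
--                         next_line.startswith('---') or
--                         (not next_line.startswith('<Card') and
--                          not next_line.startswith('<LinkCard') and
--                          not next_line == '' and
--                          not next_line.startswith('</CardGrid'))):
--                         # Add closing tag
--                         result.append('</CardGrid>')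
--                         open_cardgrids -= 1
--                 elif j >= len(lines):
--                     # End of file, close any open CardGrids
--                     result.append('</CardGrid>')
--                     open_cardgrids -= 1
--
--         i += 1
--
--     # Close any remaining open CardGrids
--     while open_cardgrids > 0:
--         result.append('</CardGrid>')
--         open_cardgrids -= 1
--
--     return '\n'.join(result)
-- ===== SOURCE B (Python) =====
-- def fix_cardgrid_tags(content: str) -> str:
--     """Add missing </CardGrid> tags after Card elements."""
--     lines = content.split('\n')
--     n = len(lines)
--     # backward pass: nxt[i] = stripped text of the first non-empty line after i, or None
--     nxt = [None] * n
--     cur = None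
--     for i in range(n - 1, -1, -1):
--         nxt[i] = cur
--         s = lines[i].strip()
--         if s:
--             cur = s
--     out = []
--     open_cardgrids = 0
--     for i in range(n):
--         line = lines[i]
--         open_cardgrids += line.count('<CardGrid>') - line.count('</CardGrid>')
--         out.append(line)
--         if open_cardgrids > 0 and ('</Card>' in line or '/>' in line):
--             nl = nxt[i]
--             if nl is None or nl.startswith('##') or nl.startswith('---') or not (
--                     nl.startswith('<Card') or nl.startswith('<LinkCard')
--                     or nl.startswith('</CardGrid')):
--                 out.append('</CardGrid>')
--                 open_cardgrids -= 1
--     out.extend(['</CardGrid>'] * open_cardgrids)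
--     return '\n'.join(out)
-- ===== Notes on version B (the rewrite author's own statement) =====
-- stated objective: alternative
-- what changed: Replaces A's inner while-scan for the next non-empty line (rerun at every Card-closing line) by a single backward pass that precomputes a next-nonempty-line table, folds the trailing close-tag flush into a list extension, and drops the always-true non-emptiness test while flattening the boolean branch nest.
import Mathlib
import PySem

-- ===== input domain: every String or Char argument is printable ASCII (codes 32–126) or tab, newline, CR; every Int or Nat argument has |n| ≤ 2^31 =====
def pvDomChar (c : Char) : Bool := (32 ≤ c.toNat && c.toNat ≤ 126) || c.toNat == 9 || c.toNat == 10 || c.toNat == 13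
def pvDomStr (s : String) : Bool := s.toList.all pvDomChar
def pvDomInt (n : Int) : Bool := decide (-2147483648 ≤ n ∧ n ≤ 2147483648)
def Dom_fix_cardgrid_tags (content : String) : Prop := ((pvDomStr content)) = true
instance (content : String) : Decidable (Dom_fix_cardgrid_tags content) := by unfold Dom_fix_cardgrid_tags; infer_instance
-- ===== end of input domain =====

-- B replaces A's per-line inner forward scan for the next non-empty line by a single
-- backward precomputation pass (a next-nonempty table), an alternative decomposition.

-- ===== PORT A =====
-- inner 'while j < len(lines) and lines[j].strip() == ""' scan
def pvScanA (lines : List String) (j : Nat) : Nat :=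
  if h : j < lines.length then
    if PySem.Str.strip lines[j] = "" then pvScanA lines (j + 1) else j
  else j
termination_by lines.length - j

-- the main 'while i < len(lines)' loop, state (result, open_cardgrids)
def pvLoopA (lines : List String) (i : Nat) (result : List String) (openc : Int) :
    List String × Int :=
  if h : i < lines.length then
    let line := lines[i]
    let openc' := openc + ((PySem.Str.count line "<CardGrid>" : Int)
                  - (PySem.Str.count line "</CardGrid>" : Int))
    let result' := result ++ [line]
    let st :=
      if openc' > 0 then
        if PySem.Str.isIn "</Card>" line || PySem.Str.isIn "/>" line then
          let j := pvScanA lines (i + 1)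
          if hj : j < lines.length then
            let next := PySem.Str.strip lines[j]
            if PySem.Str.startswith next "##" || PySem.Str.startswith next "---" ||
               (!PySem.Str.startswith next "<Card" && !PySem.Str.startswith next "<LinkCard" &&
                !(next == "") && !PySem.Str.startswith next "</CardGrid") then
              (result' ++ ["</CardGrid>"], openc' - 1)
            else (result', openc')
          else (result' ++ ["</CardGrid>"], openc' - 1)
        else (result', openc')
      else (result', openc')
    pvLoopA lines (i + 1) st.1 st.2
  else (result, openc)
termination_by lines.length - i

-- trailing 'while open_cardgrids > 0' flush
def pvFlushA (result : List String) (openc : Int) : List String :=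
  if h : openc > 0 then pvFlushA (result ++ ["</CardGrid>"]) (openc - 1) else result
termination_by openc.toNat
decreasing_by omega

def fix_cardgrid_tags (content : String) : String :=
  -- the separator is the literal "\n" ≠ "", so split? is always some; exact for s.split('\n')
  let lines := (PySem.Str.split? content "\n").getD []
  let ro := pvLoopA lines 0 [] 0
  PySem.Str.join "\n" (pvFlushA ro.1 ro.2)

-- ===== PORT B =====
-- backward pass: for each line, the stripped first non-empty later line (none if there is none)
def pvNxtB : List String → List (Option String) × Option String
  | [] => ([], none)
  | l :: rest =>
    let tc := pvNxtB rest
    let s := PySem.Str.strip l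
    (tc.2 :: tc.1, if s = "" then tc.2 else some s)

-- forward pass over lines zipped with the next-nonempty table
def pvLoopB : List (String × Option String) → List String → Int → List String × Int
  | [], out, openc => (out, openc)
  | (line, nl) :: rest, out, openc =>
    let openc' := openc + ((PySem.Str.count line "<CardGrid>" : Int)
                  - (PySem.Str.count line "</CardGrid>" : Int))
    let out' := out ++ [line]
    if openc' > 0 ∧ (PySem.Str.isIn "</Card>" line || PySem.Str.isIn "/>" line) = true then
      let close :=
        match nl with
        | none => true
        | some s => PySem.Str.startswith s "##" || PySem.Str.startswith s "---" ||
            !(PySem.Str.startswith s "<Card" || PySem.Str.startswith s "<LinkCard" ||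
              PySem.Str.startswith s "</CardGrid")
      if close then pvLoopB rest (out' ++ ["</CardGrid>"]) (openc' - 1)
      else pvLoopB rest out' openc'
    else pvLoopB rest out' openc'

def fix_cardgrid_tags_alt (content : String) : String :=
  -- same exact split as in port A (sep "\n" ≠ "" so split? is always some)
  let lines := (PySem.Str.split? content "\n").getD []
  let ro := pvLoopB (lines.zip (pvNxtB lines).1) [] 0
  PySem.Str.join "\n" (ro.1 ++ List.replicate ro.2.toNat "</CardGrid>")

-- ===== PRECONDITION & SPEC =====
def Spec_fix_cardgrid_tags (content : String) (out : String) : Prop := out = fix_cardgrid_tags_alt content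
instance (content : String) (out : String) : Decidable (Spec_fix_cardgrid_tags content out) := by unfold Spec_fix_cardgrid_tags; infer_instance

-- ===== CLAIM (what is proved, stated in full; the proofs are below) =====
def Claim_equal_fix_cardgrid_tags : Prop := ∀ (content : String), Dom_fix_cardgrid_tags content → Spec_fix_cardgrid_tags content (fix_cardgrid_tags content)

-- ===== LEMMAS AND PROOFS =====

-- specification of "first non-empty stripped line" of a suffix
def scanOpt : List String → Option String
  | [] => none
  | l :: rest => if PySem.Str.strip l = "" then scanOpt rest else some (PySem.Str.strip l)

theorem scanOpt_ne_empty {l : List String} {s : String} (h : scanOpt l = some s) : s ≠ "" := by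
  induction l with
  | nil => simp [scanOpt] at h
  | cons x xs ih =>
    simp only [scanOpt] at h
    split at h
    · exact ih h
    · next hne => cases h; exact hne

theorem pvScanA_eq_scanOpt (lines : List String) (i : Nat) :
    (if h : pvScanA lines i < lines.length then
       some (PySem.Str.strip lines[pvScanA lines i]) else none) = scanOpt (lines.drop i) := by
  generalize hn : lines.length - i = n
  induction n generalizing i with
  | zero =>
    have hge : lines.length ≤ i := by omega
    rw [pvScanA]
    have h1 : ¬ i < lines.length := by omega
    rw [dif_neg h1, dif_neg h1, List.drop_of_length_le hge]
    rfl
  | succ n ih =>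
    have hlt : i < lines.length := by omega
    rw [List.drop_eq_getElem_cons hlt]
    rw [pvScanA, dif_pos hlt]
    by_cases hs : PySem.Str.strip lines[i] = ""
    · rw [if_pos hs]
      simp only [scanOpt, if_pos hs]
      exact ih (i + 1) (by omega)
    · rw [if_neg hs]
      simp only [scanOpt, if_neg hs]
      rw [dif_pos hlt]

theorem pvNxtB_snd (lines : List String) : (pvNxtB lines).2 = scanOpt lines := by
  induction lines with
  | nil => rfl
  | cons l rest ih => simp only [pvNxtB, scanOpt, ih]

theorem pvNxtB_length (lines : List String) : (pvNxtB lines).1.length = lines.length := by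
  induction lines with
  | nil => rfl
  | cons l rest ih => simp [pvNxtB, ih]

theorem pvNxtB_getElem (lines : List String) (i : Nat) (h : i < lines.length) :
    (pvNxtB lines).1[i]'(by rw [pvNxtB_length]; exact h) = scanOpt (lines.drop (i + 1)) := by
  induction lines generalizing i with
  | nil => simp at h
  | cons l rest ih =>
    cases i with
    | zero => simpa [pvNxtB] using pvNxtB_snd rest
    | succ i =>
      have h' : i < rest.length := by simpa using h
      simpa [pvNxtB] using ih i h'

theorem pvFlushA_eq (result : List String) (openc : Int) :
    pvFlushA result openc = result ++ List.replicate openc.toNat "</CardGrid>" := by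
  generalize hn : openc.toNat = n
  induction n generalizing result openc with
  | zero =>
    have h : ¬ openc > 0 := by omega
    rw [pvFlushA, dif_neg h]
    simp
  | succ n ih =>
    have h : openc > 0 := by omega
    rw [pvFlushA, dif_pos h, ih _ _ (by omega)]
    simp [List.replicate_succ]

theorem loop_eq (lines : List String) (i : Nat) (result : List String) (openc : Int) :
    pvLoopA lines i result openc
      = pvLoopB ((lines.zip (pvNxtB lines).1).drop i) result openc := by
  generalize hn : lines.length - i = n
  induction n generalizing i result openc with
  | zero =>
    have hge : lines.length ≤ i := by omega
    rw [pvLoopA, dif_neg (by omega : ¬ i < lines.length)]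
    rw [List.drop_of_length_le (by simp [pvNxtB_length]; omega)]
    rfl
  | succ n ih =>
    have hlt : i < lines.length := by omega
    have hzlt : i < (lines.zip (pvNxtB lines).1).length := by
      simp [pvNxtB_length]; omega
    rw [List.drop_eq_getElem_cons hzlt, List.getElem_zip]
    rw [pvLoopA, dif_pos hlt]
    simp only [pvLoopB]
    rw [pvNxtB_getElem lines i hlt]
    set line := lines[i] with hline
    set o' := openc + ((PySem.Str.count line "<CardGrid>" : Int)
              - (PySem.Str.count line "</CardGrid>" : Int)) with ho'
    have hscan := pvScanA_eq_scanOpt lines (i + 1)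
    by_cases hc : o' > 0 ∧ (PySem.Str.isIn "</Card>" line || PySem.Str.isIn "/>" line) = true
    · rw [if_pos hc]
      rw [if_pos hc.1, if_pos hc.2]
      cases hso : scanOpt (lines.drop (i + 1)) with
      | none =>
        rw [hso] at hscan
        have hj : ¬ pvScanA lines (i + 1) < lines.length := by
          by_contra hj
          rw [dif_pos hj] at hscan; exact absurd hscan (by simp)
        rw [dif_neg hj]
        exact ih (i + 1) _ _ (by omega)
      | some s =>
        rw [hso] at hscan
        have hj : pvScanA lines (i + 1) < lines.length := by
          by_contra hj
          rw [dif_neg hj] at hscan; exact absurd hscan (by simp)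
        rw [dif_pos hj] at hscan
        have hsv : PySem.Str.strip lines[pvScanA lines (i + 1)] = s := by
          injection hscan
        rw [dif_pos hj, hsv]
        have hne : (s == "") = false := by
          simpa using scanOpt_ne_empty hso
        have hcond :
            (PySem.Str.startswith s "##" || PySem.Str.startswith s "---" ||
              (!PySem.Str.startswith s "<Card" && !PySem.Str.startswith s "<LinkCard" &&
               !(s == "") && !PySem.Str.startswith s "</CardGrid"))
            = (PySem.Str.startswith s "##" || PySem.Str.startswith s "---" ||
               !(PySem.Str.startswith s "<Card" || PySem.Str.startswith s "<LinkCard" ||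
                 PySem.Str.startswith s "</CardGrid")) := by
          rw [hne]
          cases PySem.Str.startswith s "##" <;>
          cases PySem.Str.startswith s "---" <;>
          cases PySem.Str.startswith s "<Card" <;>
          cases PySem.Str.startswith s "<LinkCard" <;>
          cases PySem.Str.startswith s "</CardGrid" <;> rfl
        rw [hcond]
        by_cases hcl : (PySem.Str.startswith s "##" || PySem.Str.startswith s "---" ||
               !(PySem.Str.startswith s "<Card" || PySem.Str.startswith s "<LinkCard" ||
                 PySem.Str.startswith s "</CardGrid")) = true
        · rw [if_pos hcl, if_pos hcl]
          exact ih (i + 1) _ _ (by omega)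
        · rw [if_neg hcl, if_neg hcl]
          exact ih (i + 1) _ _ (by omega)
    · rw [if_neg hc]
      rcases Decidable.not_and_iff_or_not.mp hc with h1 | h2
      · rw [if_neg h1]
        exact ih (i + 1) _ _ (by omega)
      · by_cases h1 : o' > 0
        · rw [if_pos h1, if_neg h2]
          exact ih (i + 1) _ _ (by omega)
        · rw [if_neg h1]
          exact ih (i + 1) _ _ (by omega)

-- ===== VERDICT (by name: the statement is the Claim_ definition above) =====
theorem fix_cardgrid_tags_spec : Claim_equal_fix_cardgrid_tags := by
  intro content _
  unfold Spec_fix_cardgrid_tags fix_cardgrid_tags fix_cardgrid_tags_alt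
  simp only [loop_eq, List.drop_zero, pvFlushA_eq]
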